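-- pv_equiv track=rewrite | github.com/nchalv/distrib_top_n | runners/adaptive_ss_runner_new.py | _consolidate_lists
-- ===== SOURCE A (Python) =====
-- def _consolidate_lists(list1, list2):
--     """
--     Consolidate two lists of tuples (Any, int, int) and sort by the second element (count).
--     """
--     consolidated = {}
--
--     # Process first list
--     for item, count, overest in list1:
--         if item in consolidated:
--             consolidated[item][0] += count
--             consolidated[item][1] += overest
--         else:
--             consolidated[item] = [count, overest]
--
--     # Process second list
--     for item, count, overest in list2:
--         if item in consolidated:
--             consolidated[item][0] += count
--             consolidated[item][1] += overest
--         else: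
--             consolidated[item] = [count, overest]
--
--     # Convert to list and sort by count descending
--     result = [(item, counts[0], counts[1]) for item, counts in consolidated.items()]
--     result.sort(key=lambda x: (-x[1], x[0]))
--
--     return result
-- ===== SOURCE B (Python) =====
-- def _consolidate_lists(list1, list2):
--     """
--     Consolidate two lists of tuples (Any, int, int) and sort by the second element (count).
--     Sort-based re-implementation: distinct keys in sorted order, per-key sums, then final sort.
--     """
--     combined = list1 + list2
--     keys = sorted({item for item, _, _ in combined})
--     result = [(k,
--                sum(c for i, c, _ in combined if i == k),
--                sum(o for i, _, o in combined if i == k))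
--               for k in keys]
--     result.sort(key=lambda x: (-x[1], x[0]))
--     return result
-- ===== Notes on version B (the rewrite author's own statement) =====
-- stated objective: alternative
-- what changed: Replaces the dict-accumulation loops with a sort-based aggregation: collect the distinct keys with a set, sort them, compute each key's count/overest sums by direct scans over the concatenated input, then apply the same final sort.
import Mathlib
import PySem

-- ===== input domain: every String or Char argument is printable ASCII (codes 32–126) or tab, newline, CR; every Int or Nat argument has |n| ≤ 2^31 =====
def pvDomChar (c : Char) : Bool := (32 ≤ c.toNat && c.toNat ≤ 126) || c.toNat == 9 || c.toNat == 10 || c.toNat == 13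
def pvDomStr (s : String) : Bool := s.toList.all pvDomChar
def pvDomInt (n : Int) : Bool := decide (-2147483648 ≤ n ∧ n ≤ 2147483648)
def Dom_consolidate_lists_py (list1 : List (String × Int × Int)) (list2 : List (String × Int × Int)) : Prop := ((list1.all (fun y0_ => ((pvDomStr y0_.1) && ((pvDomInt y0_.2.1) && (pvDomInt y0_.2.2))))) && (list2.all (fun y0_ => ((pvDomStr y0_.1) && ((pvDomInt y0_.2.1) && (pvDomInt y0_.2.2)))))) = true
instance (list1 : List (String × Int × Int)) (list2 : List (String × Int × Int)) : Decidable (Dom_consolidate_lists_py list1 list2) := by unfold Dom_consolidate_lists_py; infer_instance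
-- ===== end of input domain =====

-- B replaces A's dict-accumulation loops by a sort-based aggregation (sorted distinct keys + per-key sums); objective: alternative.

-- ===== PORT A =====
-- one iteration of A's accumulation loop (identical for both input lists); the Python
-- 2-element list value [count, overest] is modelled as the pair Int × Int, and its
-- in-place '+=' updates as an overwriting insert at the same key (position kept)
def pvStepA (d : PySem.Dict String (Int × Int)) (t : String × Int × Int) : PySem.Dict String (Int × Int) :=
  if d.contains t.1 then
    d.insert t.1 ((d.getD t.1 (0, 0)).1 + t.2.1, (d.getD t.1 (0, 0)).2 + t.2.2)
  else
    d.insert t.1 (t.2.1, t.2.2)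

def consolidate_lists_py (list1 : List (String × Int × Int)) (list2 : List (String × Int × Int)) : List (String × Int × Int) :=
  let d1 := list1.foldl pvStepA PySem.Dict.empty
  let d2 := list2.foldl pvStepA d1
  let result := d2.items.map (fun p => (p.1, p.2.1, p.2.2))
  PySem.List.sorted2 result (fun x => -x.2.1) (fun x => x.1) false

-- ===== PORT B =====
def consolidate_lists_py_alt (list1 : List (String × Int × Int)) (list2 : List (String × Int × Int)) : List (String × Int × Int) :=
  let combined := list1 ++ list2
  let keys := PySem.List.sorted (PySem.Set.ofList (combined.map (fun t => t.1))) (fun k => k) false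
  let result := keys.map (fun k =>
    (k, ((combined.filter (fun t => t.1 == k)).map (fun t => t.2.1)).sum,
        ((combined.filter (fun t => t.1 == k)).map (fun t => t.2.2)).sum))
  PySem.List.sorted2 result (fun x => -x.2.1) (fun x => x.1) false

-- ===== PRECONDITION & SPEC =====
def Spec_consolidate_lists_py (list1 : List (String × Int × Int)) (list2 : List (String × Int × Int)) (out : List (String × Int × Int)) : Prop := out = consolidate_lists_py_alt list1 list2
instance (list1 : List (String × Int × Int)) (list2 : List (String × Int × Int)) (out : List (String × Int × Int)) : Decidable (Spec_consolidate_lists_py list1 list2 out) := by unfold Spec_consolidate_lists_py; infer_instance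

-- ===== CLAIM (what is proved, stated in full; the proofs are below) =====
def Claim_equal_consolidate_lists_py : Prop := ∀ (list1 : List (String × Int × Int)) (list2 : List (String × Int × Int)), Dom_consolidate_lists_py list1 list2 → Spec_consolidate_lists_py list1 list2 (consolidate_lists_py list1 list2)

-- ===== LEMMAS AND PROOFS =====

-- the per-key aggregate both sides compute (B computes it literally; A's dict holds it)
def pvAgg (ts : List (String × Int × Int)) (k : String) : String × Int × Int :=
  (k, ((ts.filter (fun t => t.1 == k)).map (fun t => t.2.1)).sum,
      ((ts.filter (fun t => t.1 == k)).map (fun t => t.2.2)).sum)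

lemma pvAgg_append_singleton (ts : List (String × Int × Int)) (t : String × Int × Int) (k : String) :
    pvAgg (ts ++ [t]) k =
      if t.1 = k then ((pvAgg ts k).1, (pvAgg ts k).2.1 + t.2.1, (pvAgg ts k).2.2 + t.2.2)
      else pvAgg ts k := by
  simp only [pvAgg, List.filter_append]
  by_cases h : t.1 = k <;> simp [h]

lemma pvAgg_of_not_mem (ts : List (String × Int × Int)) (k : String) (h : k ∉ ts.map (fun t => t.1)) :
    pvAgg ts k = (k, 0, 0) := by
  have : ts.filter (fun t => t.1 == k) = [] := by
    rw [List.filter_eq_nil_iff]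
    intro a ha hk
    exact h (List.mem_map.mpr ⟨a, ha, by simpa using hk⟩)
  simp [pvAgg, this]

-- characterisation of A's accumulation loop:
-- items = per-key aggregates, keys in first-occurrence order
lemma foldl_stepA_items (ts : List (String × Int × Int)) :
    (ts.foldl pvStepA PySem.Dict.empty).items =
      (PySem.Set.ofList (ts.map (fun t => t.1))).map (pvAgg ts) := by
  induction ts using List.reverseRecOn with
  | nil => rfl
  | append_singleton ts t ih =>
    have hkeys : (ts.foldl pvStepA PySem.Dict.empty).keys = PySem.Set.ofList (ts.map (fun t => t.1)) := by
      simp only [PySem.Dict.keys, ih, List.map_map]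
      simp [pvAgg, Function.comp_def]
    have hnd : (ts.foldl pvStepA PySem.Dict.empty).keys.Nodup := by
      rw [hkeys]; exact PySem.Set.nodup_ofList _
    rw [List.foldl_append, List.foldl_cons, List.foldl_nil]
    rw [List.map_append, PySem.Set.ofList_append]
    simp only [List.map_cons, List.map_nil]
    by_cases hm : t.1 ∈ ts.map (fun t => t.1)
    · -- key already present: the insert overwrites in place
      have hc : (ts.foldl pvStepA PySem.Dict.empty).contains t.1 = true := by
        rw [PySem.Dict.contains_iff_mem_keys, hkeys, PySem.Set.mem_ofList]; exact hm
      have hmemS : t.1 ∈ PySem.Set.ofList (ts.map (fun t => t.1)) := (PySem.Set.mem_ofList _ _).mpr hm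
      have hmemitems : (t.1, ((pvAgg ts t.1).2.1, (pvAgg ts t.1).2.2)) ∈ (ts.foldl pvStepA PySem.Dict.empty).items := by
        rw [ih]
        exact List.mem_map.mpr ⟨t.1, hmemS, by simp [pvAgg]⟩
      have hgetD : (ts.foldl pvStepA PySem.Dict.empty).getD t.1 (0,0) = ((pvAgg ts t.1).2.1, (pvAgg ts t.1).2.2) :=
        PySem.Dict.getD_of_mem_items _ hmemitems hnd (0,0)
      rw [pvStepA, if_pos hc, hgetD]
      rw [PySem.Dict.items_insert_of_contains _ _ hc]
      rw [ih, List.map_map]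
      have hupd : PySem.Set.update (PySem.Set.ofList (ts.map (fun t => t.1))) [t.1] = PySem.Set.ofList (ts.map (fun t => t.1)) := by
        simp [PySem.Set.update_cons, PySem.Set.add_of_mem hmemS]
      rw [hupd]
      apply List.map_congr_left
      intro k hk
      simp only [Function.comp_apply]
      rw [pvAgg_append_singleton]
      by_cases hkt : t.1 = k
      · subst hkt
        simp [pvAgg]
      · rw [if_neg hkt]
        have hfst : (pvAgg ts k).1 = k := by simp [pvAgg]
        have : ((pvAgg ts k).1 == t.1) = false := by
          simp [hfst, beq_eq_false_iff_ne]
          exact fun h => hkt h.symm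
        simp [this]
    · -- fresh key: the insert appends
      have hc : (ts.foldl pvStepA PySem.Dict.empty).contains t.1 = false := by
        rw [Bool.eq_false_iff]
        intro h
        rw [PySem.Dict.contains_iff_mem_keys, hkeys, PySem.Set.mem_ofList] at h
        exact hm h
      rw [pvStepA, if_neg (by simp [hc])]
      rw [PySem.Dict.items_insert_of_not_contains _ _ hc]
      have hnotS : t.1 ∉ PySem.Set.ofList (ts.map (fun t => t.1)) := fun h => hm ((PySem.Set.mem_ofList _ _).mp h)
      have hupd : PySem.Set.update (PySem.Set.ofList (ts.map (fun t => t.1))) [t.1] = PySem.Set.ofList (ts.map (fun t => t.1)) ++ [t.1] := by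
        simp [PySem.Set.update_cons, PySem.Set.add_of_not_mem hnotS]
      rw [hupd, List.map_append, ih]
      congr 1
      · apply List.map_congr_left
        intro k hk
        have hne : t.1 ≠ k := by
          intro h; subst h; exact hm ((PySem.Set.mem_ofList _ _).mp hk)
        rw [pvAgg_append_singleton, if_neg hne]
      · simp only [List.map_cons, List.map_nil]
        rw [pvAgg_append_singleton, if_pos rfl, pvAgg_of_not_mem ts t.1 hm]
        simp

-- sorted2 with keys (-count, item) is sorted under the lexicographic key
lemma sorted2_eq_sorted_lex (xs : List (String × Int × Int)) :
    PySem.List.sorted2 xs (fun x => -x.2.1) (fun x => x.1) false =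
      PySem.List.sorted xs (fun x => toLex ((-x.2.1 : Int), x.1)) false := by
  simp only [PySem.List.sorted2, PySem.List.sorted]
  congr 1
  funext acc x
  congr 1
  funext a b
  by_cases h1 : (-a.2.1 : Int) < -b.2.1
  · simp [h1, Prod.Lex.lt_iff, asymm h1]
  · by_cases h2 : (-b.2.1 : Int) < -a.2.1
    · simp [h1, h2, Prod.Lex.lt_iff, ne_of_gt h2]
    · have he : (-a.2.1 : Int) = -b.2.1 := le_antisymm (not_lt.mp h2) (not_lt.mp h1)
      by_cases h3 : a.1 < b.1 <;> simp [h3, Prod.Lex.lt_iff, he]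

-- the final sort does not depend on the pre-sort order: both pre-lists carry
-- pairwise-distinct keys, so their (-count, item) sort keys are pairwise distinct
lemma sorted_map_sorted_keys (c : List (String × Int × Int)) (S : List String) (hnd : S.Nodup) :
    PySem.List.sorted ((PySem.List.sorted S (fun k => k) false).map (pvAgg c))
        (fun x => toLex ((-x.2.1 : Int), x.1)) false =
      PySem.List.sorted (S.map (pvAgg c)) (fun x => toLex ((-x.2.1 : Int), x.1)) false := by
  set K : String × Int × Int → Lex (Int × String) := fun x => toLex ((-x.2.1 : Int), x.1) with hK
  set Apre := S.map (pvAgg c) with hA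
  set Bpre := (PySem.List.sorted S (fun k => k) false).map (pvAgg c) with hB
  have hperm : Bpre.Perm Apre := (PySem.List.sorted_perm S (fun k => k) false).map _
  set ys := PySem.List.sorted Apre K false with hys
  have h1 : ys.Perm Apre := PySem.List.sorted_perm _ _ _
  have hle : ys.Pairwise (fun a b => K a ≤ K b) := PySem.List.sorted_pairwise _ _
  have hneA : Apre.Pairwise (fun a b => a.1 ≠ b.1) :=
    List.Pairwise.map (pvAgg c) (fun a b (h : a ≠ b) => by simpa [pvAgg] using h) hnd
  have hne : ys.Pairwise (fun a b => a.1 ≠ b.1) :=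
    (List.Perm.pairwise_iff (fun h => Ne.symm h) h1).mpr hneA
  have hlt : ys.Pairwise (fun a b => K a < K b) := by
    have hand := List.pairwise_and_iff.mpr ⟨hle, hne⟩
    exact hand.imp (fun {a b} h =>
      lt_of_le_of_ne h.1 (fun he => h.2 (congrArg (fun z => (ofLex z).2) he)))
  rw [PySem.List.sorted_eq_of_perm_of_pairwise_lt Bpre ys K (h1.trans hperm.symm) hlt]

-- ===== VERDICT (by name: the statement is the Claim_ definition above) =====
theorem consolidate_lists_py_spec : Claim_equal_consolidate_lists_py := by
  intro list1 list2 _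
  unfold Spec_consolidate_lists_py consolidate_lists_py consolidate_lists_py_alt
  simp only
  rw [← List.foldl_append, foldl_stepA_items]
  have heta : ((PySem.Set.ofList ((list1 ++ list2).map (fun t => t.1))).map
      (pvAgg (list1 ++ list2))).map (fun p => (p.1, p.2.1, p.2.2)) =
      (PySem.Set.ofList ((list1 ++ list2).map (fun t => t.1))).map (pvAgg (list1 ++ list2)) := by
    simp
  rw [heta]
  have hBfun : (fun k =>
      (k, (((list1 ++ list2).filter (fun t => t.1 == k)).map (fun t => t.2.1)).sum,
          (((list1 ++ list2).filter (fun t => t.1 == k)).map (fun t => t.2.2)).sum)) =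
      pvAgg (list1 ++ list2) := rfl
  rw [hBfun]
  rw [sorted2_eq_sorted_lex, sorted2_eq_sorted_lex]
  exact (sorted_map_sorted_keys (list1 ++ list2)
    (PySem.Set.ofList ((list1 ++ list2).map (fun t => t.1)))
    (PySem.Set.nodup_ofList _)).symm
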